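-- pv_equiv track=rewrite | github.com/dongkyu92/TIL | Python/Algorithm/문자열 암호화.py | solution
-- ===== SOURCE A (Python) =====
-- from collections import deque
--
-- def solution(encrypted_text, key, rotation):
--     answer = []
--     key = list(key)
--     for i, k in enumerate(key):
--         key[i] = ord(k) - 96
--         if key[i] > 26:
--             key[i] -= 26
--
--     dq = deque(list(encrypted_text))
--     dq.rotate(-rotation)
--
--     for char, k in zip(list(dq), key):
--         if ord(char) - k > 122:
--             answer.append(chr(ord(char) - k -26))
--         elif ord(char) - k < 97:
--             answer.append(chr(ord(char) - k +26))
--         else: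
--             answer.append(chr(ord(char) - k))
--
--     return ''.join(answer)
-- ===== SOURCE B (Python) =====
-- def solution(encrypted_text, key, rotation):
--     n = len(encrypted_text)
--     if n == 0:
--         return ''
--     r = rotation % n
--     m = min(n, len(key))
--     out = [''] * m
--     for j, c in enumerate(encrypted_text):
--         # output slot of source position j after a left rotation by r
--         p = j - r if j >= r else j - r + n
--         if p < m:
--             k = ord(key[p]) - 96
--             if k > 26:
--                 k -= 26
--             v = ord(c) - k
--             if v > 122:
--                 v -= 26
--             elif v < 97:
--                 v += 26
--             out[p] = chr(v)
--     return ''.join(out)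
-- ===== Notes on version B (the rewrite author's own statement) =====
-- stated objective: alternative
-- what changed: B replaces A's rotate-then-zip pipeline by a scatter pass: it walks the ciphertext in storage order and writes each decrypted character into a preallocated output buffer at slot (j - rotation%n) mod n, never materializing a rotated container or a transformed key list.
import Mathlib
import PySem

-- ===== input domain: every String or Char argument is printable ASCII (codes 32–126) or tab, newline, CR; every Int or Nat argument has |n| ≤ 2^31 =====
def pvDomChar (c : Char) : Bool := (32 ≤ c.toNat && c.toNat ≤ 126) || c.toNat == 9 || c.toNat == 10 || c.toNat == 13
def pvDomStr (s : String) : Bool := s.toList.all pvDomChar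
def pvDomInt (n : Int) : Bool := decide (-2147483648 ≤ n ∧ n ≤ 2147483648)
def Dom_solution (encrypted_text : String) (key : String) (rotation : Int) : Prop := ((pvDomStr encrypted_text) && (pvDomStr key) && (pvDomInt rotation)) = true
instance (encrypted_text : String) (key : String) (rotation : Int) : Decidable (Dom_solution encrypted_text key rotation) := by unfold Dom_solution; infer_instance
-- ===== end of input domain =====

-- B is a scatter pass: it walks the ciphertext in storage order and writes each
-- decrypted character into a preallocated buffer at slot (j - rotation%n) mod n,
-- instead of materializing a rotated deque and zipping it with a transformed key
-- (objective: alternative).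

-- ===== PORT A =====
-- key transform: ord(k) - 96, minus 26 if > 26
def aKey (k : Char) : Int :=
  let v := (k.toNat : Int) - 96
  if v > 26 then v - 26 else v

-- the loop body: shift char by k with the wrap-around branches
def aShift (c : Char) (k : Int) : Char :=
  let v := (c.toNat : Int) - k
  if v > 122 then Char.ofNat (v - 26).toNat
  else if v < 97 then Char.ofNat (v + 26).toNat
  else Char.ofNat v.toNat

def solution (encrypted_text : String) (key : String) (rotation : Int) : String :=
  let keys := key.toList.map aKey
  let l := encrypted_text.toList
  -- deque.rotate(-rotation): left rotation by (rotation mod n); hand-port, exact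
  let dq : List Char :=
    if l.length = 0 then l
    else
      let s := (PySem.Int.mod rotation (l.length : Int)).toNat
      l.drop s ++ l.take s
  String.mk ((dq.zip keys).map (fun p => aShift p.1 p.2))

-- ===== PORT B =====
-- loop body of Source B: source position j (= cj.2), char c (= cj.1); its output slot
-- is p = j - r if j ≥ r else j - r + n (written j + n - r: j < r ≤ n, so no Nat truncation)
def bStep (keyl : List Char) (r n m : Nat) (acc : List Char) (cj : Char × Nat) : List Char :=
  let p := if cj.2 ≥ r then cj.2 - r else cj.2 + n - r
  if p < m then
    let k := ((keyl.getD p ' ').toNat : Int) - 96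
    let k := if k > 26 then k - 26 else k
    let v := (cj.1.toNat : Int) - k
    let v := if v > 122 then v - 26 else if v < 97 then v + 26 else v
    acc.set p (Char.ofNat v.toNat)
  else acc

def solution_alt (encrypted_text : String) (key : String) (rotation : Int) : String :=
  let l := encrypted_text.toList
  let n := l.length
  if n = 0 then "" else
  let r := (PySem.Int.mod rotation (n : Int)).toNat
  let m := min n key.toList.length
  -- out = [''] * m; the placeholder never survives (every slot p < m is written once)
  String.mk (l.zipIdx.foldl (bStep key.toList r n m) (List.replicate m ' '))

-- ===== PRECONDITION & SPEC =====
def Spec_solution (encrypted_text : String) (key : String) (rotation : Int) (out : String) : Prop := out = solution_alt encrypted_text key rotation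
instance (encrypted_text : String) (key : String) (rotation : Int) (out : String) : Decidable (Spec_solution encrypted_text key rotation out) := by unfold Spec_solution; infer_instance

-- ===== CLAIM (what is proved, stated in full; the proofs are below) =====
def Claim_equal_solution : Prop := ∀ (encrypted_text : String) (key : String) (rotation : Int), Dom_solution encrypted_text key rotation → Spec_solution encrypted_text key rotation (solution encrypted_text key rotation)

-- ===== LEMMAS AND PROOFS =====

theorem bStep_length (keyl : List Char) (r n m : Nat) (acc : List Char) (cj : Char × Nat) :
    (bStep keyl r n m acc cj).length = acc.length := by
  simp only [bStep]
  split_ifs <;> simp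

theorem length_foldl_bStep (keyl : List Char) (r n m : Nat) (L : List (Char × Nat)) (acc : List Char) :
    (L.foldl (bStep keyl r n m) acc).length = acc.length := by
  induction L generalizing acc with
  | nil => rfl
  | cons x xs ih => rw [List.foldl_cons, ih, bStep_length]

theorem bStep_get_ne (keyl : List Char) (r n m : Nat) (acc : List Char) (cj : Char × Nat)
    (p : Nat) (hx : (if cj.2 ≥ r then cj.2 - r else cj.2 + n - r) ≠ p) :
    (bStep keyl r n m acc cj)[p]? = acc[p]? := by
  simp only [bStep]
  generalize hq : (if cj.2 ≥ r then cj.2 - r else cj.2 + n - r) = q at hx ⊢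
  by_cases hqm : q < m
  · rw [if_pos hqm]; exact List.getElem?_set_ne hx
  · rw [if_neg hqm]

theorem get_foldl_bStep_no_hit (keyl : List Char) (r n m : Nat) (L : List (Char × Nat))
    (acc : List Char) (p : Nat)
    (h : ∀ cj ∈ L, (if cj.2 ≥ r then cj.2 - r else cj.2 + n - r) ≠ p) :
    (L.foldl (bStep keyl r n m) acc)[p]? = acc[p]? := by
  induction L generalizing acc with
  | nil => rfl
  | cons x xs ih =>
      rw [List.foldl_cons, ih _ (fun cj hm => h cj (List.mem_cons_of_mem _ hm)),
        bStep_get_ne _ _ _ _ _ _ _ (h x List.mem_cons_self)]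

theorem solution_spec' (encrypted_text : String) (key : String) (rotation : Int) :
    solution encrypted_text key rotation = solution_alt encrypted_text key rotation := by
  unfold solution solution_alt
  set l := encrypted_text.toList with hl
  by_cases h0 : l.length = 0
  · simp [List.length_eq_zero_iff.mp h0]; rfl
  · simp only [h0, reduceIte]
    set r := (PySem.Int.mod rotation (l.length : Int)).toNat with hrdef
    set n := l.length with hn
    set m := min n key.toList.length with hm
    have hnpos : 0 < n := Nat.pos_of_ne_zero h0
    have hrn : r < n := by
      rw [hrdef, PySem.Int.mod_eq_emod_of_pos (by exact_mod_cast hnpos)]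
      have h1 := Int.emod_nonneg rotation (by omega : (n : Int) ≠ 0)
      have h2 := Int.emod_lt_of_pos rotation (by exact_mod_cast hnpos : (0:Int) < (n:Int))
      omega
    congr 1
    apply List.ext_getElem
    · simp only [List.length_map, List.length_zip, length_foldl_bStep, List.length_replicate,
        List.length_append, List.length_drop, List.length_take, ← hn]
      omega
    · intro p h1 h2
      have hpm : p < m := by
        have := length_foldl_bStep key.toList r n m l.zipIdx (List.replicate m ' ')
        simp only [this, List.length_replicate] at h2
        exact h2
      have hpn : p < n := lt_of_lt_of_le hpm (min_le_left ..)
      have hpk : p < key.toList.length := lt_of_lt_of_le hpm (min_le_right ..)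
      -- the unique source position that writes slot p
      set j0 := (p + r) % n with hj0
      have hj0n : j0 < n := Nat.mod_lt _ hnpos
      have hj0v : j0 = if p + r < n then p + r else p + r - n := by
        rw [hj0]
        split
        · exact Nat.mod_eq_of_lt (by assumption)
        · rw [Nat.mod_eq_sub_mod (by omega), Nat.mod_eq_of_lt (by omega)]
      have hj0l : j0 < l.length := by omega
      have hpos0 : (if j0 ≥ r then j0 - r else j0 + n - r) = p := by
        rw [hj0v]; split_ifs <;> omega
      -- split the enumeration at j0
      have htake : (l.take j0).length = j0 := by simp; omega
      have hsplit : l.zipIdx = (l.take j0).zipIdx ++ ((l[j0]'hj0l, j0) :: (l.drop (j0+1)).zipIdx (j0+1)) := by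
        conv_lhs => rw [← List.take_append_drop j0 l]
        rw [List.zipIdx_append, ← List.getElem_cons_drop hj0l, List.zipIdx_cons, htake]
        simp
      -- B's entry at p
      have hB : (l.zipIdx.foldl (bStep key.toList r n m) (List.replicate m ' '))[p]? =
          some (aShift (l[j0]'hj0l) (aKey (key.toList[p]'hpk))) := by
        rw [hsplit, List.foldl_append, List.foldl_cons]
        rw [get_foldl_bStep_no_hit]
        · simp only [bStep, hpos0, hpm, if_pos]
          have hlen : ((l.take j0).zipIdx.foldl (bStep key.toList r n m)
              (List.replicate m ' ')).length = m := by
            simp [length_foldl_bStep]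
          rw [List.getElem?_set_self (by omega)]
          simp only [List.getD_eq_getElem?_getD, List.getElem?_eq_getElem hpk, Option.getD_some]
          simp only [aShift, aKey]
          split_ifs <;> rfl
        · -- every later source position maps to a slot ≠ p
          rintro ⟨c, j⟩ hmem
          obtain ⟨hge, hlt, -⟩ := List.mem_zipIdx hmem
          have hdl : (l.drop (j0+1)).length = n - (j0+1) := by simp [hn]
          rw [hdl] at hlt
          have hjn : j < n := by omega
          have hgt : (if p + r < n then p + r else p + r - n) < j := by rw [← hj0v]; omega
          simp only
          split_ifs at hgt ⊢ <;> omega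
      -- A's entry at p equals the same character
      simp only [List.getElem_map, List.getElem_zip]
      rw [List.getElem?_eq_getElem h2] at hB
      rw [Option.some.inj hB]
      congr 1
      · -- (l.drop r ++ l.take r)[p] = l[j0]
        by_cases hc : p < n - r
        · rw [List.getElem_append_left (by simp [← hn]; omega), List.getElem_drop]
          have hj : r + p = j0 := by rw [hj0v]; split_ifs <;> omega
          simp only [hj]
        · rw [List.getElem_append_right (by simp [← hn]; omega), List.getElem_take]
          have hj : p - (l.drop r).length = j0 := by
            have : (l.drop r).length = n - r := by simp [hn]
            rw [this, hj0v]; split_ifs <;> omega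
          simp only [hj]

-- ===== VERDICT (by name: the statement is the Claim_ definition above) =====
theorem solution_spec : Claim_equal_solution := by
  intro t k r _
  exact solution_spec' t k r
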